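-- pv_equiv track=rewrite | github.com/ddullgi/BOJ | 프로그래머스/lv2/17677. ［1차］ 뉴스 클러스터링/［1차］ 뉴스 클러스터링.py | new_set
-- ===== SOURCE A (Python) =====
-- def new_set(s):
--     s = s.lower()
--     result = set()
--     for i in range(1, len(s)):
--         t = s[i - 1:i + 1]
--         x = 0
--         if t.isalpha():
--             if t in result:
--                 while True:
--                     if (t + str(x)) in result:
--                         x += 1
--                     else:
--                         result.add(t + str(x))
--                         break
--
--             else:
--                 result.add(t)
--
--     return result
-- ===== SOURCE B (Python) =====
-- def new_set(s):
--     s = s.lower()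
--     seen = {}
--     out = []
--     for i in range(1, len(s)):
--         t = s[i - 1:i + 1]
--         if t.isalpha():
--             c = seen.get(t, 0)
--             out.append(t if c == 0 else t + str(c - 1))
--             seen[t] = c + 1
--     return set(out)
-- ===== Notes on version B (the rewrite author's own statement) =====
-- stated objective: faster
-- what changed: A probes the result set with an unbounded while-loop of repeated membership tests (t+str(0), t+str(1), ...) to find the free dedup suffix for each repeated bigram; B keeps a per-bigram running-count dictionary and computes the suffix index directly with one dictionary lookup per bigram, then builds the set from the emitted list.
import Mathlib
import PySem

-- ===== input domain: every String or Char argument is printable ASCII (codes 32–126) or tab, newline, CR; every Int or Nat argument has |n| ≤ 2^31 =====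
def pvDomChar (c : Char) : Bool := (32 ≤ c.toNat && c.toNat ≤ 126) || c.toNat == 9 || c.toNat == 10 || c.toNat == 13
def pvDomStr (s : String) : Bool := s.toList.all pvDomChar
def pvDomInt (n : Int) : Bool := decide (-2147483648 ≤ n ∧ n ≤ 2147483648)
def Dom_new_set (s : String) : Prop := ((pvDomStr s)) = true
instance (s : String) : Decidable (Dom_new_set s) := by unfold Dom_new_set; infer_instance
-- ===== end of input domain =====

-- B replaces A's membership-probing while-loop with a single running-count dictionary, so each
-- bigram's dedup suffix is computed directly instead of probed for (objective: alternative/faster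
-- constant factor; equal return value as a set, proved as equal element lists).

-- ===== PORT A =====
-- the 'while True' probe loop of A; fuel (result.length + 1) only makes the same search total —
-- the proof shows the free suffix is always found within that many steps
def pvProbe (result : PySem.Set String) (t : String) (x : Int) : Nat → PySem.Set String
  | 0 => result
  | fuel + 1 =>
    if PySem.Set.contains result (t ++ PySem.Int.toStr x) then
      pvProbe result t (x + 1) fuel
    else
      PySem.Set.add result (t ++ PySem.Int.toStr x)

-- the body of A's 'for i in range(1, len(s))' loop
def pvStepA (s : String) (result : PySem.Set String) (i : Int) : PySem.Set String :=
  let t := PySem.Str.slice s (some (i - 1)) (some (i + 1))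
  let x : Int := 0
  if PySem.Str.strIsalpha t then
    if PySem.Set.contains result t then
      pvProbe result t x (result.length + 1)
    else
      PySem.Set.add result t
  else
    result

def new_set (s : String) : List String :=
  let s := PySem.Str.lower s
  (PySem.List.pyRange 1 (PySem.Str.len s) 1).foldl (pvStepA s) PySem.Set.empty

-- ===== PORT B =====
-- the body of B's loop: state = (seen counts dict, output list)
def pvStepB (s : String) (st : PySem.Dict String Int × List String) (i : Int) :
    PySem.Dict String Int × List String :=
  let t := PySem.Str.slice s (some (i - 1)) (some (i + 1))
  if PySem.Str.strIsalpha t then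
    let c := st.1.getD t 0
    (st.1.insert t (c + 1),
     st.2 ++ [if c == 0 then t else t ++ PySem.Int.toStr (c - 1)])
  else
    st

def new_set_alt (s : String) : List String :=
  let s := PySem.Str.lower s
  let st := (PySem.List.pyRange 1 (PySem.Str.len s) 1).foldl (pvStepB s) (PySem.Dict.empty, [])
  PySem.Set.ofList st.2

-- ===== PRECONDITION & SPEC =====
def Spec_new_set (s : String) (out : List String) : Prop := out = new_set_alt s
instance (s : String) (out : List String) : Decidable (Spec_new_set s out) := by unfold Spec_new_set; infer_instance

-- ===== CLAIM (what is proved, stated in full; the proofs are below) =====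
def Claim_equal_new_set : Prop := ∀ (s : String), Dom_new_set s → Spec_new_set s (new_set s)

-- ===== LEMMAS AND PROOFS =====

-- the string emitted for the (k+1)-st occurrence of bigram u: u itself first, then u+str(k-1)
def pvEmit (u : String) (k : Nat) : String :=
  if k = 0 then u else u ++ PySem.Int.toStr ((k : Int) - 1)

-- decimal digit list of a Nat, by the grade-school recursion (proof-side mirror of Nat.toDigits 10)
def pvDigs (n : Nat) : List Char :=
  if _h : n < 10 then [Nat.digitChar n]
  else pvDigs (n / 10) ++ [Nat.digitChar (n % 10)]
  decreasing_by exact Nat.div_lt_self (by omega) (by omega)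

theorem pvDigs_ne_nil (n : Nat) : pvDigs n ≠ [] := by
  unfold pvDigs
  split <;> simp

theorem pvDigitChar_inj {m n : Nat} (hm : m < 10) (hn : n < 10)
    (h : Nat.digitChar m = Nat.digitChar n) : m = n := by
  interval_cases m <;> interval_cases n <;> simp_all [Nat.digitChar]

theorem pvDigs_inj : ∀ {m n : Nat}, pvDigs m = pvDigs n → m = n := by
  intro m
  induction m using Nat.strong_induction_on with
  | _ m ih =>
    intro n h
    unfold pvDigs at h
    split at h <;> split at h
    · next hm hn =>
      simp only [List.cons.injEq] at h
      exact pvDigitChar_inj hm hn h.1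
    · next hm hn =>
      exact absurd h.symm (by
        cases hd : pvDigs (n / 10) with
        | nil => exact absurd hd (pvDigs_ne_nil _)
        | cons a l => simp)
    · next hm hn =>
      exact absurd h (by
        cases hd : pvDigs (m / 10) with
        | nil => exact absurd hd (pvDigs_ne_nil _)
        | cons a l => simp)
    · next hm hn =>
      obtain ⟨h1, h2⟩ := List.append_singleton_inj.mp h
      have hdiv : m / 10 = n / 10 :=
        ih (m / 10) (Nat.div_lt_self (by omega) (by omega)) h1
      have hmod : m % 10 = n % 10 :=
        pvDigitChar_inj (Nat.mod_lt _ (by omega)) (Nat.mod_lt _ (by omega)) h2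
      omega

theorem pvToDigitsCore_shift (f : Nat) : ∀ (n : Nat) (l : List Char),
    Nat.toDigitsCore 10 f n l = Nat.toDigitsCore 10 f n [] ++ l := by
  induction f with
  | zero => intro n l; simp [Nat.toDigitsCore]
  | succ f ih =>
    intro n l
    simp only [Nat.toDigitsCore]
    by_cases h : n / 10 = 0
    · simp [h]
    · simp only [h, if_false]
      rw [ih (n / 10) (Nat.digitChar (n % 10) :: l), ih (n / 10) [Nat.digitChar (n % 10)]]
      simp

theorem pvToDigitsCore_eq_pvDigs (f : Nat) : ∀ (n : Nat), n < f →
    Nat.toDigitsCore 10 f n [] = pvDigs n := by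
  induction f with
  | zero => intro n h; omega
  | succ f ih =>
    intro n hn
    simp only [Nat.toDigitsCore]
    by_cases h : n / 10 = 0
    · have h10 : n < 10 := by omega
      have : n % 10 = n := Nat.mod_eq_of_lt h10
      rw [if_pos h]
      unfold pvDigs
      rw [dif_pos h10, this]
    · have h10 : ¬ n < 10 := by
        intro hc; exact h (Nat.div_eq_of_lt hc)
      rw [if_neg h, pvToDigitsCore_shift,
          ih (n / 10) (by have := Nat.div_lt_self (n := n) (by omega) (by omega : 1 < 10); omega)]
      conv_rhs => rw [pvDigs]
      rw [dif_neg h10]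

theorem pvToDigits_eq_pvDigs (n : Nat) : Nat.toDigits 10 n = pvDigs n := by
  unfold Nat.toDigits
  exact pvToDigitsCore_eq_pvDigs (n + 1) n (by omega)

theorem pvToChars_nonneg (n : Int) (h : 0 ≤ n) :
    PySem.Int.toChars n = pvDigs n.toNat := by
  unfold PySem.Int.toChars
  rw [if_neg (by omega), pvToDigits_eq_pvDigs]

theorem pvToChars_ne_nil (n : Int) (h : 0 ≤ n) : PySem.Int.toChars n ≠ [] := by
  rw [pvToChars_nonneg n h]; exact pvDigs_ne_nil _

theorem pvToStr_inj {m n : Int} (hm : 0 ≤ m) (hn : 0 ≤ n)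
    (h : PySem.Int.toStr m = PySem.Int.toStr n) : m = n := by
  have h' : PySem.Int.toChars m = PySem.Int.toChars n := by
    rw [← PySem.Int.toList_toStr, ← PySem.Int.toList_toStr, h]
  rw [pvToChars_nonneg m hm, pvToChars_nonneg n hn] at h'
  have := pvDigs_inj h'
  omega

-- length of the current bigram slice
theorem pvSlice_len (s : String) (i : Int) (h1 : 1 ≤ i) (h2 : i < (s.toList.length : Int)) :
    (PySem.Str.slice s (some (i - 1)) (some (i + 1))).toList.length = 2 := by
  rw [PySem.Str.toList_slice, PySem.Chars.slice_eq_listSlice, PySem.List.length_slice]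
  unfold PySem.List.clampIdx
  rw [if_neg (by omega), if_neg (by omega)]
  omega

-- the invariant carried through both loops
def pvInv (seen : PySem.Dict String Int) (out : List String) : Prop :=
  (∀ u, 0 ≤ seen.getD u 0) ∧
  (∀ e, e ∈ out ↔ ∃ (u : String) (k : Nat), (k : Int) < seen.getD u 0 ∧ u.toList.length = 2 ∧ e = pvEmit u k) ∧
  out.Nodup

theorem pvEmit_zero (u : String) : pvEmit u 0 = u := by simp [pvEmit]

theorem pvEmit_succ (u : String) (x : Nat) :
    pvEmit u (x + 1) = u ++ PySem.Int.toStr (x : Int) := by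
  simp only [pvEmit, Nat.succ_ne_zero, if_false]
  congr 1
  congr 1
  push_cast
  ring

theorem pvEmit_len_two {u : String} (hu : u.toList.length = 2) {k : Nat}
    (h : (pvEmit u k).toList.length = 2) : k = 0 := by
  cases k with
  | zero => rfl
  | succ x =>
    rw [pvEmit_succ] at h
    rw [String.toList_append, List.length_append, hu, PySem.Int.toList_toStr] at h
    have := pvToChars_ne_nil (x : Int) (by omega)
    cases hc : PySem.Int.toChars (x : Int) with
    | nil => exact absurd hc this
    | cons a l => rw [hc] at h; simp at h

-- (t ++ str x) as an emit: decoding is unique for 2-char bases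
theorem pvEmit_suffix_eq {t u : String} (ht : t.toList.length = 2) (hu : u.toList.length = 2)
    (x k : Nat) (h : t ++ PySem.Int.toStr (x : Int) = pvEmit u k) : u = t ∧ k = x + 1 := by
  cases k with
  | zero =>
    rw [pvEmit_zero] at h
    have : (u.toList.length) = 2 + (PySem.Int.toChars (x : Int)).length := by
      rw [← h, String.toList_append, List.length_append, ht, PySem.Int.toList_toStr]
    have hne := pvToChars_ne_nil (x : Int) (by omega)
    cases hc : PySem.Int.toChars (x : Int) with
    | nil => exact absurd hc hne
    | cons a l => rw [hc] at this; simp [hu] at this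
  | succ y =>
    rw [pvEmit_succ] at h
    have h' : t.toList ++ (PySem.Int.toStr (x : Int)).toList
        = u.toList ++ (PySem.Int.toStr (y : Int)).toList := by
      rw [← String.toList_append, ← String.toList_append, h]
    have hlen : t.toList.length = u.toList.length := by rw [ht, hu]
    obtain ⟨h1, h2⟩ := List.append_inj h' hlen
    have hu_t : u = t := String.toList_inj.mp h1.symm
    have hxy : (x : Int) = (y : Int) :=
      pvToStr_inj (by omega) (by omega) (String.toList_inj.mp h2)
    constructor
    · exact hu_t
    · omega

-- membership of the bare bigram t in out, under the invariant
theorem pvMem_base {seen out} (hI : pvInv seen out) {t : String} (ht : t.toList.length = 2) :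
    t ∈ out ↔ 1 ≤ seen.getD t 0 := by
  obtain ⟨hI1, hI2, hI3⟩ := hI
  constructor
  · intro hmem
    obtain ⟨u, k, hk, hu, he⟩ := (hI2 t).mp hmem
    have hk0 : k = 0 := pvEmit_len_two hu (by rw [← he, ht])
    subst hk0
    rw [pvEmit_zero] at he
    subst he
    exact hk
  · intro h
    exact (hI2 t).mpr ⟨t, 0, by omega, ht, (pvEmit_zero t).symm⟩

-- membership of a suffixed copy t ++ str(x) in out, under the invariant
theorem pvMem_suffix {seen out} (hI : pvInv seen out) {t : String} (ht : t.toList.length = 2)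
    (x : Nat) : (t ++ PySem.Int.toStr (x : Int)) ∈ out ↔ (x : Int) + 1 < seen.getD t 0 := by
  obtain ⟨hI1, hI2, hI3⟩ := hI
  constructor
  · intro hmem
    obtain ⟨u, k, hk, hu, he⟩ := (hI2 _).mp hmem
    obtain ⟨hut, hkx⟩ := pvEmit_suffix_eq ht hu x k he
    subst hut; subst hkx
    push_cast at hk ⊢
    omega
  · intro h
    exact (hI2 _).mpr ⟨t, x + 1, by push_cast; omega, ht, (pvEmit_succ t x).symm⟩

theorem pvSet_contains_iff {res : PySem.Set String} {e : String} :
    PySem.Set.contains res e = true ↔ e ∈ res := by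
  simp [PySem.Set.contains]

-- running the probe loop: with the membership profile of the invariant it lands exactly on str(c-1)
theorem pvProbe_run (res : PySem.Set String) (t : String) (c : Nat)
    (hmem : ∀ x : Nat, PySem.Set.contains res (t ++ PySem.Int.toStr (x : Int)) = true ↔ (x : Int) + 1 < (c : Int)) :
    ∀ (fuel y : Nat), y < c → c ≤ y + fuel →
      pvProbe res t (y : Int) fuel = res ++ [t ++ PySem.Int.toStr ((c : Int) - 1)] := by
  intro fuel
  induction fuel with
  | zero => intro y h1 h2; omega
  | succ f ih =>
    intro y h1 h2
    rw [pvProbe]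
    by_cases hy : (y : Int) + 1 < (c : Int)
    · rw [if_pos ((hmem y).mpr hy)]
      have : ((y : Int) + 1) = ((y + 1 : Nat) : Int) := by push_cast; ring
      rw [this]
      exact ih (y + 1) (by omega) (by omega)
    · have hnc : ¬ (PySem.Set.contains res (t ++ PySem.Int.toStr (y : Int)) = true) := by
        rw [hmem y]; exact hy
      have hcast : ((y : Nat) : Int) = (c : Int) - 1 := by omega
      rw [if_neg hnc]
      unfold PySem.Set.add
      rw [if_neg hnc, hcast]

theorem pvEmit_inj {t : String} (ht : t.toList.length = 2) {k k' : Nat}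
    (h : pvEmit t k = pvEmit t k') : k = k' := by
  cases k with
  | zero =>
    rw [pvEmit_zero] at h
    exact (pvEmit_len_two ht (by rw [← h, ht])).symm
  | succ x =>
    cases k' with
    | zero =>
      rw [pvEmit_zero] at h
      exact pvEmit_len_two ht (by rw [h, ht])
    | succ y =>
      rw [pvEmit_succ, pvEmit_succ] at h
      have h' : t.toList ++ (PySem.Int.toStr (x : Int)).toList
          = t.toList ++ (PySem.Int.toStr (y : Int)).toList := by
        rw [← String.toList_append, ← String.toList_append, h]
      have := pvToStr_inj (m := (x : Int)) (n := (y : Int)) (by omega) (by omega)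
        (String.toList_inj.mp (List.append_cancel_left h'))
      omega

-- the new element is fresh, so the occurrence count is bounded by the output length
theorem pvCount_le {seen out} (hI : pvInv seen out) {t : String} (ht : t.toList.length = 2) :
    (seen.getD t 0).toNat ≤ out.length := by
  set C : Nat := (seen.getD t 0).toNat with hCdef
  have hsub : (List.range C).map (pvEmit t) ⊆ out := by
    intro e he
    obtain ⟨k, hk, rfl⟩ := List.mem_map.mp he
    rw [List.mem_range] at hk
    exact (hI.2.1 _).mpr ⟨t, k, by omega, ht, rfl⟩
  have hnd : ((List.range C).map (pvEmit t)).Nodup :=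
    (List.nodup_range).map_on (fun k _ k' _ h => pvEmit_inj ht h)
  have := (List.Nodup.subperm hnd hsub).length_le
  simpa using this

-- pushing one occurrence of t preserves the invariant
theorem pvInv_push {seen : PySem.Dict String Int} {out : List String} (hI : pvInv seen out)
    {t : String} (ht : t.toList.length = 2) :
    pvInv (seen.insert t (seen.getD t 0 + 1)) (out ++ [pvEmit t (seen.getD t 0).toNat]) := by
  set C : Nat := (seen.getD t 0).toNat with hCdef
  have hC : seen.getD t 0 = (C : Int) := by have := hI.1 t; omega
  have hfresh : pvEmit t C ∉ out := by
    cases hc : C with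
    | zero =>
      rw [pvEmit_zero]
      intro hmem
      have := (pvMem_base hI ht).mp hmem
      omega
    | succ C' =>
      rw [pvEmit_succ]
      intro hmem
      have := (pvMem_suffix hI ht C').mp hmem
      rw [hC, hc] at this
      push_cast at this
      omega
  refine ⟨?_, ?_, ?_⟩
  · intro u
    rw [PySem.Dict.getD_insert]
    split_ifs with h
    · have := hI.1 t; omega
    · exact hI.1 u
  · intro e
    constructor
    · intro hmem
      rcases List.mem_append.mp hmem with hmem | hmem
      · obtain ⟨u, k, hk, hu, he⟩ := (hI.2.1 e).mp hmem
        refine ⟨u, k, ?_, hu, he⟩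
        rw [PySem.Dict.getD_insert]
        split_ifs with h
        · rw [h] at hk; omega
        · exact hk
      · have he : e = pvEmit t C := by simpa using hmem
        refine ⟨t, C, ?_, ht, he⟩
        rw [PySem.Dict.getD_insert, if_pos rfl]
        omega
    · rintro ⟨u, k, hk, hu, he⟩
      rw [PySem.Dict.getD_insert] at hk
      rw [List.mem_append]
      by_cases hut : u = t
      · subst hut
        rw [if_pos rfl, hC] at hk
        have hk' : k < C + 1 := by exact_mod_cast hk
        by_cases hkC : k = C
        · right; subst hkC; simp [he]
        · left
          exact (hI.2.1 e).mpr ⟨u, k, by rw [hC]; exact_mod_cast (by omega : k < C), ht, he⟩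
      · left
        rw [if_neg hut] at hk
        exact (hI.2.1 e).mpr ⟨u, k, hk, hu, he⟩
  · exact List.Nodup.append hI.2.2 (List.nodup_singleton _)
      (by simpa using hfresh)

-- one loop step preserves the relation and the invariant
theorem pvStep (s : String) (i : Int) (h1 : 1 ≤ i) (h2 : i < (s.toList.length : Int))
    (seen : PySem.Dict String Int) (out : List String) (hI : pvInv seen out) :
    pvStepA s out i = (pvStepB s (seen, out) i).2 ∧ pvInv (pvStepB s (seen, out) i).1 (pvStepB s (seen, out) i).2 := by
  have ht : (PySem.Str.slice s (some (i - 1)) (some (i + 1))).toList.length = 2 :=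
    pvSlice_len s i h1 h2
  simp only [pvStepA, pvStepB]
  set t := PySem.Str.slice s (some (i - 1)) (some (i + 1)) with htdef
  by_cases ha : PySem.Str.strIsalpha t = true
  · rw [if_pos ha, if_pos ha]
    obtain ⟨C, hC⟩ : ∃ C : Nat, seen.getD t 0 = (C : Int) :=
      ⟨(seen.getD t 0).toNat, by have := hI.1 t; omega⟩
    have hpush := pvInv_push hI ht
    rw [hC, Int.toNat_natCast] at hpush
    by_cases hc0 : C = 0
    · subst hc0
      have hc0' : (seen.getD t 0 == 0) = true := by simp [hC]
      have hnotmem : ¬ (PySem.Set.contains out t = true) := by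
        rw [pvSet_contains_iff, pvMem_base hI ht, hC]
        omega
      rw [if_neg hnotmem, if_pos hc0']
      refine ⟨?_, ?_⟩
      · unfold PySem.Set.add
        rw [if_neg hnotmem]
      · rw [pvEmit_zero] at hpush
        rw [hC]
        exact hpush
    · have hc0' : ¬ ((seen.getD t 0 == 0) = true) := by
        simp only [hC, beq_iff_eq]
        exact_mod_cast hc0
      have hmemt : PySem.Set.contains out t = true := by
        rw [pvSet_contains_iff, pvMem_base hI ht, hC]
        exact_mod_cast Nat.one_le_iff_ne_zero.mpr hc0
      rw [if_pos hmemt, if_neg hc0']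
      have hcc : ((C : Int)) - 1 = seen.getD t 0 - 1 := by rw [hC]
      refine ⟨?_, ?_⟩
      · have hmem : ∀ x : Nat,
            PySem.Set.contains out (t ++ PySem.Int.toStr (x : Int)) = true ↔ (x : Int) + 1 < (C : Int) := by
          intro x
          rw [pvSet_contains_iff, pvMem_suffix hI ht x, hC]
        have hcnt := pvCount_le hI ht
        rw [hC, Int.toNat_natCast] at hcnt
        have hrun := pvProbe_run out t C hmem (out.length + 1) 0 (by omega) (by omega)
        rw [Nat.cast_zero] at hrun
        rw [hrun, hcc]
      · rw [hC]
        obtain ⟨C', rfl⟩ := Nat.exists_eq_succ_of_ne_zero hc0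
        rw [pvEmit_succ] at hpush
        have hcast : ((C' + 1 : Nat) : Int) - 1 = (C' : Int) := by push_cast; ring
        rw [hcast]
        exact hpush
  · rw [if_neg ha, if_neg ha]
    exact ⟨rfl, hI⟩

-- folding over any index list inside bounds keeps A's set equal to B's output list
theorem pvFold (s : String) (l : List Int)
    (hb : ∀ i ∈ l, 1 ≤ i ∧ i < (s.toList.length : Int)) :
    ∀ (seen : PySem.Dict String Int) (out : List String), pvInv seen out →
      l.foldl (pvStepA s) out = (l.foldl (pvStepB s) (seen, out)).2 ∧
      pvInv (l.foldl (pvStepB s) (seen, out)).1 (l.foldl (pvStepB s) (seen, out)).2 := by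
  induction l with
  | nil => intro seen out hI; exact ⟨rfl, hI⟩
  | cons i l ih =>
    intro seen out hI
    have hbi := hb i (List.mem_cons_self ..)
    obtain ⟨heq, hI'⟩ := pvStep s i hbi.1 hbi.2 seen out hI
    simp only [List.foldl_cons, heq]
    exact ih (fun j hj => hb j (List.mem_cons_of_mem _ hj)) _ _ hI'

theorem pvInv_init : pvInv PySem.Dict.empty [] := by
  refine ⟨?_, ?_, List.nodup_nil⟩ <;>
    simp [PySem.Dict.getD, PySem.Dict.get?, PySem.Dict.empty]

-- ===== VERDICT (by name: the statement is the Claim_ definition above) =====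
theorem new_set_spec : Claim_equal_new_set := by
  intro s _
  unfold Spec_new_set new_set new_set_alt
  have hb : ∀ i ∈ PySem.List.pyRange 1 (PySem.Str.len (PySem.Str.lower s)) 1,
      1 ≤ i ∧ i < ((PySem.Str.lower s).toList.length : Int) := by
    intro i hi
    rw [PySem.List.mem_pyRange_one] at hi
    rw [PySem.Str.len_eq] at hi
    exact hi
  obtain ⟨heq, hI⟩ := pvFold (PySem.Str.lower s) _ hb PySem.Dict.empty [] pvInv_init
  have hempty : (PySem.Set.empty : PySem.Set String) = [] := rfl
  rw [hempty, heq, PySem.Set.ofList_eq_self_of_nodup _ hI.2.2]
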